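-- pv_equiv track=rewrite | github.com/oleg-zharkikh/leetcode | greedy_algorithm.py | distribute_samples
-- ===== SOURCE A (Python) =====
-- def distribute_samples(orders, n, samples, k):
--     satisfied_customers = 0
--     orders.sort()
--     samples.sort()
--
--     idx_sample = 0
--     while idx_sample < len(samples) and len(orders) > 0:
--         if samples[idx_sample] >= orders[0]:
--             del orders[0]
--             satisfied_customers += 1
--         idx_sample += 1
--     return satisfied_customers
-- ===== SOURCE B (Python) =====
-- def distribute_samples(orders, n, samples, k):
--     os = sorted(orders)
--     i = 0
--     for s in sorted(samples):
--         if i < len(os) and s >= os[i]: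
--             i += 1
--     return i
-- ===== Notes on version B (the rewrite author's own statement) =====
-- stated objective: faster
-- what changed: B sorts copies and advances an index (two-pointer fold over samples) instead of repeatedly deleting orders[0] from the list; B also does not mutate its arguments.
import Mathlib
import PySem

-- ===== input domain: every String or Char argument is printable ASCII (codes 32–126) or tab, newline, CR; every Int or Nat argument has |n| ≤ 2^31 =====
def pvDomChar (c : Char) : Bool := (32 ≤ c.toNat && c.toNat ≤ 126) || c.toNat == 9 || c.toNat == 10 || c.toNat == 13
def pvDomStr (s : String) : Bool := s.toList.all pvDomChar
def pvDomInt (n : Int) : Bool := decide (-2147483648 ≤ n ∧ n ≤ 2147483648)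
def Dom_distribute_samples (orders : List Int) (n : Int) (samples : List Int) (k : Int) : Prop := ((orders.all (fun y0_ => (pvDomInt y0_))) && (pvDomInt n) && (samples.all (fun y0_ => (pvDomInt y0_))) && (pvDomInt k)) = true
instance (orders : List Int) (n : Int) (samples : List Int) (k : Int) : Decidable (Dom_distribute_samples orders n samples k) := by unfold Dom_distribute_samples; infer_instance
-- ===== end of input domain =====

-- B: sort copies + index pointer instead of repeated del orders[0] (faster); A mutates (sorts) its
-- arguments in place, B does not — the equivalence proved here is about the return value only.
-- ===== PORT A =====
def pyA_loop (orders samples : List Int) (c : Int) : Int :=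
  match orders, samples with
  | o :: os, s :: ss => if s ≥ o then pyA_loop os ss (c + 1) else pyA_loop (o :: os) ss c
  | _, _ => c
termination_by samples.length

def distribute_samples (orders : List Int) (n : Int) (samples : List Int) (k : Int) : Int :=
  pyA_loop (PySem.List.sorted orders (fun x => x) false)
    (PySem.List.sorted samples (fun x => x) false) 0

-- ===== PORT B =====
def pyB_step (os : List Int) (i : Int) (s : Int) : Int :=
  if i < (os.length : Int) ∧ s ≥ PySem.List.pyGetD os i 0 then i + 1 else i

def distribute_samples_alt (orders : List Int) (n : Int) (samples : List Int) (k : Int) : Int :=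
  let os := PySem.List.sorted orders (fun x => x) false
  (PySem.List.sorted samples (fun x => x) false).foldl (pyB_step os) 0

-- ===== PRECONDITION & SPEC =====
def Spec_distribute_samples (orders : List Int) (n : Int) (samples : List Int) (k : Int) (out : Int) : Prop := out = distribute_samples_alt orders n samples k
instance (orders : List Int) (n : Int) (samples : List Int) (k : Int) (out : Int) : Decidable (Spec_distribute_samples orders n samples k out) := by unfold Spec_distribute_samples; infer_instance

-- ===== CLAIM (what is proved, stated in full; the proofs are below) =====
def Claim_equal_distribute_samples : Prop := ∀ (orders : List Int) (n : Int) (samples : List Int) (k : Int), Dom_distribute_samples orders n samples k → Spec_distribute_samples orders n samples k (distribute_samples orders n samples k)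

-- ===== LEMMAS AND PROOFS =====

theorem pyA_loop_nil (os : List Int) (c : Int) : pyA_loop os [] c = c := by
  rw [pyA_loop.eq_def]; cases os <;> rfl

theorem pyA_loop_cons (o : Int) (os : List Int) (s : Int) (ss : List Int) (c : Int) :
    pyA_loop (o :: os) (s :: ss) c =
      if s ≥ o then pyA_loop os ss (c + 1) else pyA_loop (o :: os) ss c := by
  rw [pyA_loop.eq_def]

theorem pyA_loop_nil_orders (samples : List Int) (c : Int) : pyA_loop [] samples c = c := by
  rw [pyA_loop.eq_def]

theorem foldl_eq_loop (ss : List Int) (os : List Int) (j : Nat) (hj : j ≤ os.length) :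
    List.foldl (pyB_step os) (j : Int) ss = pyA_loop (os.drop j) ss (j : Int) := by
  induction ss generalizing j with
  | nil => simp [pyA_loop_nil]
  | cons s ss ih =>
    rcases Nat.lt_or_ge j os.length with hlt | hge
    · have hdrop : os.drop j = os[j] :: os.drop (j + 1) := List.drop_eq_getElem_cons hlt
      have hget : PySem.List.pyGetD os (j : Int) 0 = os[j] := by
        simp [PySem.List.pyGetD_natCast, hlt]
      by_cases hs : s ≥ os[j]
      · have hstep : pyB_step os (j : Int) s = ((j + 1 : Nat) : Int) := by
          simp [pyB_step, hget, hs, hlt]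
        simp only [List.foldl_cons, hstep, hdrop, pyA_loop_cons, hs, if_pos]
        rw [ih (j + 1) hlt]
        push_cast; ring_nf
      · have hstep : pyB_step os (j : Int) s = (j : Int) := by
          simp [pyB_step, hget, hs]
        simp only [List.foldl_cons, hstep, hdrop, pyA_loop_cons, hs, if_neg, not_false_iff]
        rw [← hdrop, ih j hj]
    · have hj' : j = os.length := le_antisymm hj hge
      have hdrop : os.drop j = [] := by simp [hj']
      have hstep : pyB_step os (j : Int) s = (j : Int) := by
        simp [pyB_step, hj']
      simp only [List.foldl_cons, hstep, hdrop, pyA_loop_nil_orders]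
      rw [ih j hj, hdrop, pyA_loop_nil_orders]

-- ===== VERDICT =====
theorem distribute_samples_spec : Claim_equal_distribute_samples := by
  intro orders n samples k _
  unfold Spec_distribute_samples distribute_samples distribute_samples_alt
  have h := foldl_eq_loop (PySem.List.sorted samples (fun x => x) false)
    (PySem.List.sorted orders (fun x => x) false) 0 (Nat.zero_le _)
  simpa using h.symm
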